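-- pv_equiv track=rewrite | github.com/Projudah/SearchEngine | main.py | addPostMergeBrackets
-- ===== SOURCE A (Python) =====
-- AND = ['AND', ' AND ']
--
-- LEFTBRACKET = '('
--
-- RIGHTBRACKET = ')'
--
-- def addPostMergeBrackets(array, join=AND[1]):
--     if len(array) is 1:
--         return array[0]
--     else:
--         center = len(array) // 2
--         left = addPostMergeBrackets(array[:center], join)
--         right = addPostMergeBrackets(array[center:], join)
--         result = LEFTBRACKET + left + join + right + RIGHTBRACKET
--         return result
-- ===== SOURCE B (Python) =====
-- AND = ['AND', ' AND ']
--
-- LEFTBRACKET = '('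
--
-- RIGHTBRACKET = ')'
--
-- def addPostMergeBrackets(array, join=AND[1]):
--     # Single traversal over index ranges, emitting tokens in order; one final join.
--     out = []
--
--     def emit(lo, hi):
--         if hi - lo == 1:
--             out.append(array[lo])
--             return
--         mid = (lo + hi) // 2
--         out.append(LEFTBRACKET)
--         emit(lo, mid)
--         out.append(join)
--         emit(mid, hi)
--         out.append(RIGHTBRACKET)
--
--     emit(0, len(array))
--     return ''.join(out)
-- ===== Notes on version B (the rewrite author's own statement) =====
-- stated objective: faster
-- what changed: Instead of recursive slicing with repeated string concatenation, B walks index ranges (no slices) emitting tokens into a flat list during one traversal and joins them once at the end.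
import Mathlib
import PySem

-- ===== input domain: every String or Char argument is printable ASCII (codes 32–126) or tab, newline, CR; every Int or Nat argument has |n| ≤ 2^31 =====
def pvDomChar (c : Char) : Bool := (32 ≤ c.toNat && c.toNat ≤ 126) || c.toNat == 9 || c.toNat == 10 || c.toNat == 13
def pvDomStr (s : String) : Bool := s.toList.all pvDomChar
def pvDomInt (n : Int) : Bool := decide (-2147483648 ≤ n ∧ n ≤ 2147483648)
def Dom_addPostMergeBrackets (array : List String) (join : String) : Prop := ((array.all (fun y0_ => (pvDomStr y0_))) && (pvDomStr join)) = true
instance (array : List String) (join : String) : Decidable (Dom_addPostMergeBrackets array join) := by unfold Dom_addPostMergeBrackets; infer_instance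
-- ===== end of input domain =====

-- B replaces A's slice-and-concatenate recursion by an index-range traversal that emits
-- tokens into a flat list and joins them once at the end.

-- ===== PORT A =====
-- Python tests `len(array) is 1`; the `≤ 1` guard additionally catches the empty list,
-- on which the Python recurses forever (RecursionError) — excluded by Pre_.
def addPostMergeBrackets (array : List String) (join : String) : String :=
  if _h : array.length ≤ 1 then
    (PySem.List.pyGet? array 0).getD ""
  else
    let center := array.length / 2
    let left := addPostMergeBrackets (PySem.List.slice array none (some (center : Int))) join
    let right := addPostMergeBrackets (PySem.List.slice array (some (center : Int)) none) join
    "(" ++ left ++ join ++ right ++ ")"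
termination_by array.length
decreasing_by
  · rw [PySem.List.slice_to_natCast]; simp; omega
  · rw [PySem.List.slice_from_natCast]; simp; omega

-- ===== PORT B =====
-- the inner `emit(lo, hi)` of Source B, threading the `out` list it appends to.
-- The `hi ≤ lo` branch makes it total; it is unreachable from a nonempty initial array (Pre_):
-- in Python that case (empty input) recurses forever.
def pvEmit (array : List String) (join : String) (lo hi : Nat) (out : List String) : List String :=
  if hi - lo = 1 then
    out ++ [array.getD lo ""]
  else if hi ≤ lo then out
  else
    let mid := (lo + hi) / 2
    let out1 := out ++ ["("]
    let out2 := pvEmit array join lo mid out1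
    let out3 := out2 ++ [join]
    let out4 := pvEmit array join mid hi out3
    out4 ++ [")"]
termination_by hi - lo
decreasing_by
  · omega
  · omega

def addPostMergeBrackets_alt (array : List String) (join : String) : String :=
  PySem.Str.join "" (pvEmit array join 0 array.length [])

-- ===== PRECONDITION & SPEC =====
-- Pre_ excludes only the empty list, on which both Pythons recurse forever (RecursionError).
def Pre_addPostMergeBrackets (array : List String) (join : String) : Prop := array ≠ []
instance (array : List String) (join : String) : Decidable (Pre_addPostMergeBrackets array join) := by unfold Pre_addPostMergeBrackets; infer_instance
def pvWitness_addPostMergeBrackets : List String × String := (["a", "b", "c"], " AND ")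

def Spec_addPostMergeBrackets (array : List String) (join : String) (out : String) : Prop := out = addPostMergeBrackets_alt array join
instance (array : List String) (join : String) (out : String) : Decidable (Spec_addPostMergeBrackets array join out) := by unfold Spec_addPostMergeBrackets; infer_instance

-- ===== CLAIM (what is proved, stated in full; the proofs are below) =====
def Claim_equal_addPostMergeBrackets : Prop := ∀ (array : List String) (join : String), Dom_addPostMergeBrackets array join → Pre_addPostMergeBrackets array join → Spec_addPostMergeBrackets array join (addPostMergeBrackets array join)

-- ===== LEMMAS AND PROOFS =====

lemma pvEmit_acc (array : List String) (join : String) :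
    ∀ (n lo hi : Nat), hi - lo = n → ∀ (o p : List String),
      pvEmit array join lo hi (o ++ p) = o ++ pvEmit array join lo hi p := by
  intro n
  induction n using Nat.strong_induction_on with
  | _ n ih =>
    intro lo hi hn o p
    unfold pvEmit
    by_cases h1 : hi - lo = 1
    · simp [h1]
    · by_cases h2 : hi ≤ lo
      · simp [h2]
      · simp only [if_neg h1, if_neg h2]
        have e1 := ih ((lo + hi) / 2 - lo) (by omega) lo ((lo + hi) / 2) rfl
        have e2 := ih (hi - (lo + hi) / 2) (by omega) ((lo + hi) / 2) hi rfl
        simp only [List.append_assoc] at *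
        rw [e1 o (p ++ ["("]), List.append_assoc, e2 o _]
        simp

lemma pvEmit_tokens (array : List String) (join : String) (lo hi : Nat) (h : 2 ≤ hi - lo) :
    pvEmit array join lo hi [] =
      ["("] ++ pvEmit array join lo ((lo + hi) / 2) [] ++ [join]
        ++ pvEmit array join ((lo + hi) / 2) hi [] ++ [")"] := by
  rw [pvEmit]
  simp only [if_neg (by omega : ¬ hi - lo = 1), if_neg (by omega : ¬ hi ≤ lo)]
  have e1 := pvEmit_acc array join ((lo + hi) / 2 - lo) lo ((lo + hi) / 2) rfl ["("] []
  have e2 := pvEmit_acc array join (hi - (lo + hi) / 2) ((lo + hi) / 2) hi rfl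
  simp only [List.append_nil] at e1
  rw [show ([] ++ ["("] : List String) = ["("] from rfl] at *
  simp only [e1]
  rw [e2 (["("] ++ pvEmit array join lo ((lo + hi) / 2) []) [join]]
  have e3 := e2 [join] []
  simp only [List.append_nil] at e3
  simp [e3]

lemma pvInterFlat (l : List (List Char)) : (List.intersperse ([]:List Char) l).flatten = l.flatten := by
  induction l with
  | nil => simp
  | cons a l ih => cases l <;> simp_all [List.intersperse]

lemma pvJoinNilAppend (xs ys : List String) :
    PySem.Str.join "" (xs ++ ys) = PySem.Str.join "" xs ++ PySem.Str.join "" ys := by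
  simp [PySem.Str.join, PySem.Chars.join, List.intercalate, pvInterFlat, String.ofList_append]

lemma pvJoinNilSingleton (x : String) : PySem.Str.join "" [x] = x := by
  simp [PySem.Str.join, PySem.Chars.join_singleton]

lemma pv_main (array : List String) (join : String) :
    ∀ (n lo hi : Nat), hi - lo = n → lo < hi → hi ≤ array.length →
    PySem.Str.join "" (pvEmit array join lo hi []) =
      addPostMergeBrackets ((array.drop lo).take (hi - lo)) join := by
  intro n
  induction n using Nat.strong_induction_on with
  | _ n ih =>
    intro lo hi hn hlt hle
    by_cases h1 : hi - lo = 1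
    · -- singleton segment
      have hlo : lo < array.length := by omega
      have hseg : (array.drop lo).take (hi - lo) = [array[lo]] := by
        rw [h1, List.drop_eq_getElem_cons hlo, List.take_succ_cons, List.take_zero]
      rw [pvEmit, if_pos h1]
      conv_rhs => rw [addPostMergeBrackets]
      rw [dif_pos (by rw [hseg]; simp)]
      rw [hseg]
      simp [pvJoinNilSingleton, List.getD_eq_getElem?_getD,
        List.getElem?_eq_getElem hlo]
    · have h2 : 2 ≤ hi - lo := by omega
      set mid := (lo + hi) / 2 with hmid
      have hml : mid - lo < n := by omega
      have hhm : hi - mid < n := by omega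
      have hlom : lo < mid := by omega
      have hmhi : mid < hi := by omega
      have hlen : ((array.drop lo).take (hi - lo)).length = hi - lo := by
        simp; omega
      have hcenter : (hi - lo) / 2 = mid - lo := by omega
      have htake : ((array.drop lo).take (hi - lo)).take (mid - lo) = (array.drop lo).take (mid - lo) := by
        rw [List.take_take]
        congr 1
        omega
      have hdrop : ((array.drop lo).take (hi - lo)).drop (mid - lo) = (array.drop mid).take (hi - mid) := by
        rw [List.drop_take, List.drop_drop]
        have h3 : hi - lo - (mid - lo) = hi - mid := by omega
        have h4 : lo + (mid - lo) = mid := by omega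
        rw [h3, h4]
      -- A side first (the only dite in the goal is on the right)
      conv_rhs => rw [addPostMergeBrackets]
      rw [dif_neg (by rw [hlen]; omega)]
      simp only [hlen, hcenter, PySem.List.slice_to_natCast, PySem.List.slice_from_natCast,
        htake, hdrop]
      -- B side
      rw [pvEmit_tokens array join lo hi h2]
      rw [pvJoinNilAppend, pvJoinNilAppend, pvJoinNilAppend, pvJoinNilAppend,
          pvJoinNilSingleton, pvJoinNilSingleton, pvJoinNilSingleton]
      rw [ih (mid - lo) hml lo mid rfl hlom (by omega),
          ih (hi - mid) hhm mid hi rfl hmhi (by omega)]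

-- ===== VERDICT (by name: the statement is the Claim_ definition above) =====
theorem addPostMergeBrackets_spec : Claim_equal_addPostMergeBrackets := by
  intro array join _ hpre
  unfold Spec_addPostMergeBrackets addPostMergeBrackets_alt
  have hne : array ≠ [] := hpre
  have h := pv_main array join array.length 0 array.length rfl
    (by cases array <;> simp_all) le_rfl
  simp at h
  exact h.symm
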